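-- pv_equiv track=rewrite | github.com/sulaiman-07389/CS-102-DSA | BinarySearchRecursiveModified.py | binary_search_recursive_modified
-- ===== SOURCE A (Python) =====
-- def binary_search_recursive_modified(lst,item,low,high):
--     if high >= low:
--
--         mid = (high + low) // 2
--
--         if lst[mid] == item:
--             return mid
--
--         elif lst[mid] > item:
--             return binary_search_recursive_modified(lst, item, low, mid - 1)
--
--         else:
--             return binary_search_recursive_modified(lst, item, mid + 1, high)
--
--     else:
--         lst.append(item)
--         lst.sort()
--         return lst.index(item)
-- ===== SOURCE B (Python) =====
-- def binary_search_recursive_modified(lst, item, low, high):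
--     # Size-based iterative search: maintain a (low, size) window instead of
--     # (low, high), halving the size each step.  On a miss, the result index is
--     # the item's rank (number of smaller elements), computed in one pass, and
--     # the list is mutated like the original (append + sort).
--     size = high - low + 1
--     while size > 0:
--         half = (size - 1) // 2
--         mid = low + half
--         if lst[mid] == item:
--             return mid
--         if lst[mid] > item:
--             size = half
--         else:
--             low = mid + 1
--             size = size - 1 - half
--     k = 0
--     for x in lst:
--         if x < item:
--             k += 1
--     lst.append(item)
--     lst.sort()
--     return k
-- ===== Notes on version B (the rewrite author's own statement) =====
-- stated objective: alternative
-- what changed: Recursion on (low, high) replaced by an iterative loop over a (low, size) window that halves size each step, and the miss case returns the item's rank (count of smaller elements in one pass) instead of re-finding it with lst.index after the sort; the list is still mutated (append + sort) like A.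
-- outside the precondition, e.g. on binary_search_recursive_modified([0, 1, 2], 2, -4, 2): A returns -1, B returns -1
import Mathlib
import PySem

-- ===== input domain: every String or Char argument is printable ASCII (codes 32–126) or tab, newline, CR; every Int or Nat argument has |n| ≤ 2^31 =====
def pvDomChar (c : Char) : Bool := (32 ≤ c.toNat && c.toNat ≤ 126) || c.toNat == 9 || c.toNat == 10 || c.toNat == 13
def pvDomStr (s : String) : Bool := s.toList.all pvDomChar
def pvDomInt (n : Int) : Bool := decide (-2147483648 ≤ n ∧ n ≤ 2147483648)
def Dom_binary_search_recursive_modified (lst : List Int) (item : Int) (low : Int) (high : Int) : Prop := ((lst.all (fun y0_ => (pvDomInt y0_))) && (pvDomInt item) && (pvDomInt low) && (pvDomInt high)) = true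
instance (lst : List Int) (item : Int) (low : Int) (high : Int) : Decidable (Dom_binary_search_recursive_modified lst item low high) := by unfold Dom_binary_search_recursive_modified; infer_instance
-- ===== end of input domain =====

-- B replaces the (low, high) recursion by an iterative (low, size) window loop and computes the
-- miss-case index as the item's rank (count of smaller elements) instead of lst.index after the
-- sort; both Pythons mutate lst identically on a miss (append + sort), the equivalence proved
-- here is about the return value.

-- ===== PORT A =====
-- literal port of A's recursion; `fuel` is only a totality guard ((high-low+1).toNat+1 always
-- suffices since the interval shrinks each call); the pyGet? `none` (IndexError) branch is excluded by Pre_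
def pvGoA (lst : List Int) (item : Int) : Nat → Int → Int → Int
  | 0, _, _ => 0  -- fuel exhausted: unreachable
  | fuel + 1, low, high =>
    if high ≥ low then
      let mid := PySem.Int.floordiv (high + low) 2
      match PySem.List.pyGet? lst mid with
      | none => 0  -- IndexError in Python; unreachable under Pre_
      | some v =>
        if v = item then mid
        else if v > item then pvGoA lst item fuel low (mid - 1)
        else pvGoA lst item fuel (mid + 1) high
    else
      ((PySem.List.index? (PySem.List.sorted (lst ++ [item]) id) item).getD 0 : Nat)

def binary_search_recursive_modified (lst : List Int) (item : Int) (low : Int) (high : Int) : Int :=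
  pvGoA lst item ((high - low + 1).toNat + 1) low high

-- ===== PORT B =====
-- Source B's while-loop over the (low, size) window; size is a genuine Nat here, the recursion is
-- well-founded on it (no fuel); returns `some idx` on a hit, `none` when the window is empty
def pvSearchB (lst : List Int) (item : Int) : Int → Nat → Option Int
  | _, 0 => none
  | lo, n + 1 =>
    let half := n / 2
    let mid := lo + (half : Int)
    match PySem.List.pyGet? lst mid with
    | none => some 0  -- IndexError in Python; unreachable under Pre_
    | some v =>
      if v = item then some mid
      else if v > item then pvSearchB lst item lo half
      else pvSearchB lst item (mid + 1) (n - half)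
  termination_by _ n => n
  decreasing_by all_goals omega

def binary_search_recursive_modified_alt (lst : List Int) (item : Int) (low : Int) (high : Int) : Int :=
  match pvSearchB lst item low (high - low + 1).toNat with
  | some i => i
  | none => lst.foldl (fun k x => if x < item then k + 1 else k) 0  -- rank of item in lst

-- ===== PRECONDITION & SPEC =====
-- Pre_ excludes out-of-bounds search windows (low < -len(lst) or high ≥ len(lst) with high ≥ low), where the
-- search can index outside [-len, len) and raise IndexError; on a few such inputs the probed indices happen
-- to stay in range and A still returns — B returns the very same value there (see the cite in claim.json).
def Pre_binary_search_recursive_modified (lst : List Int) (item : Int) (low : Int) (high : Int) : Prop :=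
  high < low ∨ (-(lst.length : Int) ≤ low ∧ high < (lst.length : Int))
instance (lst : List Int) (item : Int) (low : Int) (high : Int) : Decidable (Pre_binary_search_recursive_modified lst item low high) := by unfold Pre_binary_search_recursive_modified; infer_instance
def pvWitness_binary_search_recursive_modified : List Int × Int × Int × Int := ([1, 3, 5], 3, 0, 2)

def Spec_binary_search_recursive_modified (lst : List Int) (item : Int) (low : Int) (high : Int) (out : Int) : Prop := out = binary_search_recursive_modified_alt lst item low high
instance (lst : List Int) (item : Int) (low : Int) (high : Int) (out : Int) : Decidable (Spec_binary_search_recursive_modified lst item low high out) := by unfold Spec_binary_search_recursive_modified; infer_instance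

-- ===== CLAIM (what is proved, stated in full; the proofs are below) =====
def Claim_equal_binary_search_recursive_modified : Prop := ∀ (lst : List Int) (item : Int) (low : Int) (high : Int), Dom_binary_search_recursive_modified lst item low high → Pre_binary_search_recursive_modified lst item low high → Spec_binary_search_recursive_modified lst item low high (binary_search_recursive_modified lst item low high)

-- ===== LEMMAS AND PROOFS =====

-- In a sorted list containing `item`, the index of the first occurrence of `item`
-- is the number of elements strictly below it.
theorem pv_index_sorted (item : Int) :
    ∀ (s : List Int), s.Pairwise (· ≤ ·) → item ∈ s →
      PySem.List.index? s item = some (s.countP (fun x => decide (x < item))) := by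
  intro s
  induction s with
  | nil => intro _ h; cases h
  | cons h t ih =>
    intro hp hmem
    have hle : ∀ x ∈ t, h ≤ x := (List.pairwise_cons.mp hp).1
    by_cases hh : h = item
    · subst hh
      rw [PySem.List.index?_cons_self]
      have : t.countP (fun x => decide (x < h)) = 0 := by
        rw [List.countP_eq_zero]
        intro x hx
        simpa using not_lt.mpr (hle x hx)
      simp [this]
    · have hmem' : item ∈ t := by
        rcases List.mem_cons.mp hmem with h1 | h1
        · exact absurd h1.symm hh
        · exact h1
      have hlt : h < item := lt_of_le_of_ne (hle item hmem') hh
      rw [PySem.List.index?_cons_of_ne t hh, ih (List.pairwise_cons.mp hp).2 hmem']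
      simp [hlt]

-- A's fallback (sort then index) equals B's fallback (one-pass rank count).
theorem pv_fallback_eq (lst : List Int) (item : Int) :
    (((PySem.List.index? (PySem.List.sorted (lst ++ [item]) id) item).getD 0 : Nat) : Int)
      = lst.foldl (fun k x => if x < item then k + 1 else k) 0 := by
  have hp : (PySem.List.sorted (lst ++ [item]) id).Pairwise (· ≤ ·) := by
    simpa using PySem.List.sorted_pairwise (xs := lst ++ [item]) (key := id)
  have hmem : item ∈ PySem.List.sorted (lst ++ [item]) id := by
    rw [PySem.List.mem_sorted]; simp
  rw [pv_index_sorted item _ hp hmem]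
  have hperm : (PySem.List.sorted (lst ++ [item]) id).Perm (lst ++ [item]) :=
    PySem.List.sorted_perm (lst ++ [item]) id false
  rw [Option.getD_some, hperm.countP_eq]
  rw [PySem.List.foldl_ite_add_one]
  simp [List.countP_append]

-- With enough fuel, A's recursion on (low, high) equals B's loop on (low, size)
-- followed by A's fallback, where size = (high - low + 1).toNat.
theorem pv_main (lst : List Int) (item : Int) :
    ∀ (n : Nat) (fuel : Nat) (low high : Int), (high - low + 1).toNat = n → n < fuel →
      pvGoA lst item fuel low high
        = match pvSearchB lst item low n with
          | some i => i
          | none => ((PySem.List.index? (PySem.List.sorted (lst ++ [item]) id) item).getD 0 : Nat) := by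
  intro n
  induction n using Nat.strong_induction_on with
  | _ n ih =>
    intro fuel low high hn hf
    cases fuel with
    | zero => omega
    | succ f =>
      cases n with
      | zero =>
        have hlh : ¬ high ≥ low := by omega
        rw [pvGoA, pvSearchB]
        simp [hlh]
      | succ m =>
        have hhigh : high = low + m := by omega
        have hlh : high ≥ low := by omega
        have hmid : PySem.Int.floordiv (high + low) 2 = low + ((m / 2 : Nat) : Int) := by
          rw [PySem.Int.floordiv_eq_ediv_of_pos (by norm_num)]
          omega
        rw [pvGoA, pvSearchB]
        simp only [hlh, if_true, hmid]
        cases hget : PySem.List.pyGet? lst (low + ((m / 2 : Nat) : Int)) with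
        | none => simp
        | some v =>
          by_cases hv : v = item
          · simp [hv]
          · by_cases hgt : v > item
            · simp only [hv, if_false, hgt, if_true]
              have := ih (m / 2) (by omega) f low (low + ((m / 2 : Nat) : Int) - 1)
                (by omega) (by omega)
              simpa using this
            · simp only [hv, if_false, hgt]
              have := ih (m - m / 2) (by omega) f (low + ((m / 2 : Nat) : Int) + 1) high
                (by omega) (by omega)
              simpa using this

-- ===== VERDICT (by name: the statement is the Claim_ definition above) =====
theorem binary_search_recursive_modified_spec : Claim_equal_binary_search_recursive_modified := by
  intro lst item low high _ _
  unfold Spec_binary_search_recursive_modified binary_search_recursive_modified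
    binary_search_recursive_modified_alt
  rw [pv_main lst item ((high - low + 1).toNat) ((high - low + 1).toNat + 1) low high rfl
    (by omega)]
  cases pvSearchB lst item low ((high - low + 1).toNat) with
  | none => simpa using pv_fallback_eq lst item
  | some i => rfl
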